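-- pv_equiv track=rewrite | github.com/priyankapri/Encryption-decryption | Lab6_07_06_2021.py | adjusted_key
-- ===== SOURCE A (Python) =====
-- def adjusted_key(text,key):
--     result =''
--     counter =0
--     for c in text:
--         if ord(c) >=97 and ord(c) <=122:
--             result = result+key[counter % len(key)]
--             counter +=1
--     return result
-- ===== SOURCE B (Python) =====
-- def adjusted_key(text, key):
--     n = sum(1 for c in text if 97 <= ord(c) <= 122)
--     if n == 0:
--         return ''
--     return key * (n // len(key)) + key[:n % len(key)]
-- ===== Notes on version B (the rewrite author's own statement) =====
-- stated objective: faster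
-- what changed: B counts the lowercase letters once and builds the result in closed form as key*(n//len(key)) + key[:n%len(key)], removing the per-lowercase-letter string append of A.
import Mathlib
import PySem

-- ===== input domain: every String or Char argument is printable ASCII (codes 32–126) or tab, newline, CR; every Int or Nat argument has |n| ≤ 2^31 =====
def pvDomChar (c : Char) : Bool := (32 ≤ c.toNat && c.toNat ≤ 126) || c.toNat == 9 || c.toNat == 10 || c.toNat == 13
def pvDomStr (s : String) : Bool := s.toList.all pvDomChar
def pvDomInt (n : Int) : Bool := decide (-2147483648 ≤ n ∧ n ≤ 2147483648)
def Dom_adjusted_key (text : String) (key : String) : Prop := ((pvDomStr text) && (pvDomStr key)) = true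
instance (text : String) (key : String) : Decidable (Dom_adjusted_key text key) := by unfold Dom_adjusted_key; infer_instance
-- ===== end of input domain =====

-- B builds the repeated key in closed form from the lowercase-letter count instead of appending
-- one key character per lowercase letter (objective: faster, measured; constant-factor).

-- ===== PORT A =====
-- literal transliteration of A's loop: state = (result, counter);
-- key[counter % len(key)]: the `none` branch is Python's ZeroDivisionError on len(key)=0 (excluded by Pre_)
def adjusted_key (text : String) (key : String) : String :=
  (text.toList.foldl (fun (st : String × Nat) c =>
    if 97 ≤ c.toNat ∧ c.toNat ≤ 122 then
      (st.1 ++ (match key.toList[st.2 % key.toList.length]? with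
                | some ch => String.ofList [ch]
                | none => ""), st.2 + 1)
    else st) ("", 0)).1

-- ===== PORT B =====
-- transliteration of Source B: n = count of ASCII-lowercase chars; '' if n = 0;
-- else key * (n // len(key)) + key[:n % len(key)]
def adjusted_key_alt (text : String) (key : String) : String :=
  let n := (text.toList.filter (fun c => 97 ≤ c.toNat && c.toNat ≤ 122)).length
  if n = 0 then ""
  else String.ofList ((List.replicate (n / key.toList.length) key.toList).flatten)
       ++ String.ofList (key.toList.take (n % key.toList.length))

-- ===== PRECONDITION & SPEC =====
-- Pre_ excludes exactly the inputs where Python A raises ZeroDivisionError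
-- (key empty while text contains an ASCII-lowercase letter); B raises there too.
def Pre_adjusted_key (text : String) (key : String) : Prop :=
  key ≠ "" ∨ ∀ c ∈ text.toList, ¬(97 ≤ c.toNat ∧ c.toNat ≤ 122)
instance (text : String) (key : String) : Decidable (Pre_adjusted_key text key) := by
  unfold Pre_adjusted_key; infer_instance

def pvWitness_adjusted_key : String × String := ("Hello World", "key")

def Spec_adjusted_key (text : String) (key : String) (out : String) : Prop := out = adjusted_key_alt text key
instance (text : String) (key : String) (out : String) : Decidable (Spec_adjusted_key text key out) := by unfold Spec_adjusted_key; infer_instance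

-- ===== CLAIM (what is proved, stated in full; the proofs are below) =====
def Claim_equal_adjusted_key : Prop := ∀ (text : String) (key : String), Dom_adjusted_key text key → Pre_adjusted_key text key → Spec_adjusted_key text key (adjusted_key text key)

-- ===== LEMMAS AND PROOFS =====

-- the cyclic key stream of length n (proof-side characterisation of both programs' output)
def pvCyc (k : List Char) (n : Nat) : List Char :=
  (List.range n).map (fun i => k.getD (i % k.length) ' ')

theorem pvCyc_succ_shift (k : List Char) (c n : Nat) :
    (List.range (n+1)).map (fun i => k.getD ((c + i) % k.length) ' ')
      = k.getD (c % k.length) ' ' ::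
        (List.range n).map (fun i => k.getD ((c + 1 + i) % k.length) ' ') := by
  have h : List.range (n+1) = 0 :: (List.range n).map (·+1) := by
    simpa using List.range_succ_eq_map (n := n)
  rw [h, List.map_cons, List.map_map]
  congr 1
  apply List.map_congr_left
  intro i _
  have h2 : c + (i + 1) = c + 1 + i := by omega
  simp [Function.comp, h2]

-- A's loop invariant: the fold appends the cyclic key stream, one char per lowercase letter
theorem pvA_fold (k : List Char) (hk : 0 < k.length) :
    ∀ (L : List Char) (r : String) (c : Nat),
      (L.foldl (fun (st : String × Nat) ch =>
         if 97 ≤ ch.toNat ∧ ch.toNat ≤ 122 then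
           (st.1 ++ (match k[st.2 % k.length]? with
                     | some x => String.ofList [x]
                     | none => ""), st.2 + 1)
         else st) (r, c)).1
      = r ++ String.ofList
          (((List.range (L.filter (fun ch => 97 ≤ ch.toNat && ch.toNat ≤ 122)).length).map
            (fun i => k.getD ((c + i) % k.length) ' '))) := by
  intro L
  induction L with
  | nil => intro r c; simp
  | cons a L ih =>
    intro r c
    by_cases hp : 97 ≤ a.toNat ∧ a.toNat ≤ 122
    · have hlt : c % k.length < k.length := Nat.mod_lt _ hk
      have hget : k[c % k.length]? = some (k.getD (c % k.length) ' ') := by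
        rw [List.getElem?_eq_getElem hlt]
        simp [List.getD_eq_getElem?_getD, List.getElem?_eq_getElem hlt]
      simp only [List.foldl_cons, if_pos hp, hget]
      rw [ih]
      have hf : (List.filter (fun ch => 97 ≤ ch.toNat && ch.toNat ≤ 122) (a :: L)).length
          = (List.filter (fun ch => 97 ≤ ch.toNat && ch.toNat ≤ 122) L).length + 1 := by
        simp [hp]
      rw [hf, pvCyc_succ_shift]
      rw [String.append_assoc, ← String.ofList_append]
      rfl
    · simp only [List.foldl_cons, if_neg hp]
      rw [ih]
      have hf : (List.filter (fun ch => 97 ≤ ch.toNat && ch.toNat ≤ 122) (a :: L))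
          = List.filter (fun ch => 97 ≤ ch.toNat && ch.toNat ≤ 122) L := by
        rw [List.filter_cons, if_neg (by simpa using hp)]
      rw [hf]

-- first len chars of the stream are the key itself
theorem pvCyc_add (k : List Char) (m : Nat) :
    pvCyc k (k.length + m) = k ++ pvCyc k m := by
  unfold pvCyc
  rw [List.range_add, List.map_append, List.map_map]
  congr 1
  · apply List.ext_getElem
    · simp
    · intro i h1 h2
      simp only [List.length_map, List.length_range] at h1
      simp [List.getD_eq_getElem?_getD, Nat.mod_eq_of_lt h1,
            List.getElem?_eq_getElem h1]
  · apply List.map_congr_left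
    intro i _
    simp [Function.comp, Nat.add_mod_left]

theorem pvCyc_full (k : List Char) :
    ∀ (q r0 : Nat), r0 < k.length →
      pvCyc k (q * k.length + r0) = (List.replicate q k).flatten ++ k.take r0 := by
  intro q
  induction q with
  | zero =>
    intro r0 hr
    simp only [Nat.zero_mul, Nat.zero_add, List.replicate_zero, List.flatten_nil, List.nil_append]
    unfold pvCyc
    apply List.ext_getElem
    · simp; omega
    · intro i h1 h2
      simp only [List.length_map, List.length_range] at h1
      simp [List.getD_eq_getElem?_getD, Nat.mod_eq_of_lt (by omega : i < k.length),
            List.getElem?_eq_getElem (by omega : i < k.length)]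
  | succ q ih =>
    intro r0 hr
    have h : (q + 1) * k.length + r0 = k.length + (q * k.length + r0) := by ring
    rw [h, pvCyc_add k, ih r0 hr]
    simp [List.replicate_succ]

-- ===== VERDICT (by name: the statement is the Claim_ definition above) =====
theorem adjusted_key_spec : Claim_equal_adjusted_key := by
  intro text key hdom hpre
  unfold Spec_adjusted_key adjusted_key adjusted_key_alt
  rcases hpre with hk | hnone
  · -- key nonempty
    have hk' : 0 < key.toList.length := by
      rw [List.length_pos_iff]
      intro h
      exact hk (by simpa using congrArg String.ofList h)
    rw [pvA_fold key.toList hk' text.toList "" 0]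
    set n := (text.toList.filter (fun c => 97 ≤ c.toNat && c.toNat ≤ 122)).length with hn
    have hcyc : (List.range n).map (fun i => key.toList.getD ((0 + i) % key.toList.length) ' ')
        = pvCyc key.toList n := by
      unfold pvCyc; apply List.map_congr_left; intro i _; simp
    rw [hcyc]
    have hdm : n = n / key.toList.length * key.toList.length + n % key.toList.length :=
      (Nat.div_add_mod' n key.toList.length).symm
    by_cases h0 : n = 0
    · simp [h0, pvCyc]
    · rw [if_neg h0]
      conv_lhs => rw [hdm]
      rw [pvCyc_full key.toList _ _ (Nat.mod_lt _ hk')]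
      rw [String.empty_append, String.ofList_append]
  · -- key may be empty, but text has no lowercase letters: both return ""
    have hfold : ∀ (L : List Char), (∀ c ∈ L, ¬(97 ≤ c.toNat ∧ c.toNat ≤ 122)) →
        (L.foldl (fun (st : String × Nat) c =>
          if 97 ≤ c.toNat ∧ c.toNat ≤ 122 then
            (st.1 ++ (match key.toList[st.2 % key.toList.length]? with
                      | some ch => String.ofList [ch]
                      | none => ""), st.2 + 1)
          else st) ("", 0)) = ("", 0) := by
      intro L hL
      induction L with
      | nil => rfl
      | cons a L ih =>
        simp only [List.foldl_cons, if_neg (hL a (by simp))]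
        exact ih (fun c hc => hL c (by simp [hc]))
    rw [hfold text.toList hnone]
    have hfilter : (text.toList.filter (fun c => 97 ≤ c.toNat && c.toNat ≤ 122)).length = 0 := by
      simp only [List.length_eq_zero_iff, List.filter_eq_nil_iff]
      intro c hc
      simpa using hnone c hc
    simp [hfilter]
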